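-- pv_equiv track=rewrite | github.com/petrlos/AoC_2021 | 19/19.py | rotateCompleteScanner
-- ===== SOURCE A (Python) =====
-- def rotateByY(input, index):
--     #rotates only axe Y - 4 possible directions
--     x, y, z = input
--     rotateByYDict = {0:[x,y,z], 1:[-x,y,-z], 2:[-z, y, x], 3:[z, y, -x]}
--     return rotateByYDict[index]
--
-- def rotateToOtherDirection(input, index):
--     #rotates the whole cube - 6 possible directions
--     x, y, z = input
--     rotateToOtherSideDict = {0:[x, y, z], 1:[y, z, x], 2:[ z, -y, x],
--                              3:[x, -z,y], 4:[z, x, y], 5:[-x,-z, y]}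
--     return rotateToOtherSideDict[index]
--
-- def rotateCompleteScanner(beacons, rotation):
--     #finds new coords for all beacons from scanner in ONE of 24 rotations
--     rotatedScanner = []
--     direction, YAxe = (rotation //4), (rotation % 4)
--     for beacon in beacons:
--         beaconDirectionRotated = rotateToOtherDirection(beacon, direction)
--         beaconYrotated = rotateByY(beaconDirectionRotated, YAxe)
--         rotatedScanner.append(beaconYrotated)
--     return rotatedScanner
-- ===== SOURCE B (Python) =====
-- def _rotationMatrix(rotation):
--     # compose the direction map and the Y-axis map into one 3x3 matrix
--     d, y = divmod(rotation, 4)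
--     D = [[[1, 0, 0], [0, 1, 0], [0, 0, 1]],
--          [[0, 1, 0], [0, 0, 1], [1, 0, 0]],
--          [[0, 0, 1], [0, -1, 0], [1, 0, 0]],
--          [[1, 0, 0], [0, 0, -1], [0, 1, 0]],
--          [[0, 0, 1], [1, 0, 0], [0, 1, 0]],
--          [[-1, 0, 0], [0, 0, -1], [0, 1, 0]]][d]
--     Y = [[[1, 0, 0], [0, 1, 0], [0, 0, 1]],
--          [[-1, 0, 0], [0, 1, 0], [0, 0, -1]],
--          [[0, 0, -1], [0, 1, 0], [1, 0, 0]],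
--          [[0, 0, 1], [0, 1, 0], [-1, 0, 0]]][y]
--     return [[sum(Y[i][k] * D[k][j] for k in range(3)) for j in range(3)] for i in range(3)]
--
-- def _apply(M, b):
--     return [sum(M[i][k] * b[k] for k in range(3)) for i in range(3)]
--
-- def rotateCompleteScanner(beacons, rotation):
--     # Pre-compose the two rotation maps into one matrix, then one matrix-vector multiply per beacon.
--     M = _rotationMatrix(rotation)
--     return [_apply(M, b) for b in beacons]
-- ===== Notes on version B (the rewrite author's own statement) =====
-- stated objective: alternative
-- what changed: B pre-composes the direction map and the Y-axis map into a single 3x3 rotation matrix once before the loop, then performs one matrix-vector multiply per beacon, instead of A's two chained dict-lookup rotations per beacon.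
-- outside the precondition, e.g. on rotateCompleteScanner([], 72): A returns [], B raises IndexError; on rotateCompleteScanner([[1, 2, 3]], 24): A raises KeyError, B raises IndexError; on rotateCompleteScanner([[1, 2]], 0): A raises ValueError, B raises IndexError
import Mathlib
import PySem

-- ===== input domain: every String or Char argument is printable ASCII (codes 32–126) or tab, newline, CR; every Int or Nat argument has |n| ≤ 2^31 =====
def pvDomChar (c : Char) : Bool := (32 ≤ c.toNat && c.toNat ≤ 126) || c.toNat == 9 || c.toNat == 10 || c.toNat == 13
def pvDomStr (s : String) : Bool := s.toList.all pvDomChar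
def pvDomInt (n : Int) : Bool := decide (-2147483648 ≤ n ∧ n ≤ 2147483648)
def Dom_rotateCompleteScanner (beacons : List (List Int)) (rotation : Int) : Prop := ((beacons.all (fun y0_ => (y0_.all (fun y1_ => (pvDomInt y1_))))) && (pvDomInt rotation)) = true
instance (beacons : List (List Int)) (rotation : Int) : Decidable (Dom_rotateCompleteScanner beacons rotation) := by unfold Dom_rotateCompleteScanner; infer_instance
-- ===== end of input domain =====

-- B pre-composes the two per-beacon rotation maps into one 3x3 matrix before the loop, then does a single matrix-vector multiply per beacon (objective: alternative decomposition).

-- ===== PORT A =====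
-- KeyError (missing dict key) and unpack failure (len ≠ 3) are excluded by Pre_; the `_ => []` / `.getD []` arms are unreachable there.
def rotateByY (input : List Int) (index : Int) : List Int :=
  match input with
  | [x, y, z] =>
    ((PySem.Dict.ofList [((0:Int), [x, y, z]), (1, [-x, y, -z]), (2, [-z, y, x]), (3, [z, y, -x])]).get? index).getD []
  | _ => []

def rotateToOtherDirection (input : List Int) (index : Int) : List Int :=
  match input with
  | [x, y, z] =>
    ((PySem.Dict.ofList [((0:Int), [x, y, z]), (1, [y, z, x]), (2, [z, -y, x]),
                         (3, [x, -z, y]), (4, [z, x, y]), (5, [-x, -z, y])]).get? index).getD []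
  | _ => []

def rotateCompleteScanner (beacons : List (List Int)) (rotation : Int) : List (List Int) :=
  let direction := PySem.Int.floordiv rotation 4
  let yAxe := PySem.Int.mod rotation 4
  beacons.foldl (fun rotatedScanner beacon =>
    rotatedScanner ++ [rotateByY (rotateToOtherDirection beacon direction) yAxe]) []

-- ===== PORT B =====
def pvRotationMatrix (rotation : Int) : List (List Int) :=
  let d := PySem.Int.floordiv rotation 4
  let y := PySem.Int.mod rotation 4
  let D : List (List Int) := PySem.List.pyGetD
      [[[1, 0, 0], [0, 1, 0], [0, 0, 1]],
       [[0, 1, 0], [0, 0, 1], [1, 0, 0]],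
       [[0, 0, 1], [0, -1, 0], [1, 0, 0]],
       [[1, 0, 0], [0, 0, -1], [0, 1, 0]],
       [[0, 0, 1], [1, 0, 0], [0, 1, 0]],
       [[-1, 0, 0], [0, 0, -1], [0, 1, 0]]] d []
  let Y : List (List Int) := PySem.List.pyGetD
      [[[1, 0, 0], [0, 1, 0], [0, 0, 1]],
       [[-1, 0, 0], [0, 1, 0], [0, 0, -1]],
       [[0, 0, -1], [0, 1, 0], [1, 0, 0]],
       [[0, 0, 1], [0, 1, 0], [-1, 0, 0]]] y []
  (PySem.List.pyRange 0 3 1).map (fun i =>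
    (PySem.List.pyRange 0 3 1).map (fun j =>
      ((PySem.List.pyRange 0 3 1).map (fun k =>
        PySem.List.pyGetD (PySem.List.pyGetD Y i []) k 0 *
        PySem.List.pyGetD (PySem.List.pyGetD D k []) j 0)).sum))

def pvApply (M : List (List Int)) (b : List Int) : List Int :=
  (PySem.List.pyRange 0 3 1).map (fun i =>
    ((PySem.List.pyRange 0 3 1).map (fun k =>
      PySem.List.pyGetD (PySem.List.pyGetD M i []) k 0 * PySem.List.pyGetD b k 0)).sum)

def rotateCompleteScanner_alt (beacons : List (List Int)) (rotation : Int) : List (List Int) :=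
  let M := pvRotationMatrix rotation
  beacons.map (fun b => pvApply M b)

-- ===== PRECONDITION & SPEC =====
-- Pre_ excludes rotations outside 0..23 and beacons not of length exactly 3: there A raises
-- (KeyError on the dict lookup, resp. unpack ValueError/TypeError) on any nonempty beacon list,
-- and on the empty beacon list with such a rotation A's [] is an accident of its per-beacon
-- validation (the bad rotation is never checked) that B, which builds the matrix up front, raises on.
def Pre_rotateCompleteScanner (beacons : List (List Int)) (rotation : Int) : Prop :=
  0 ≤ rotation ∧ rotation < 24 ∧ ∀ b ∈ beacons, b.length = 3
instance (beacons : List (List Int)) (rotation : Int) : Decidable (Pre_rotateCompleteScanner beacons rotation) := by unfold Pre_rotateCompleteScanner; infer_instance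

def pvWitness_rotateCompleteScanner : List (List Int) × Int := ([[1, 2, 3], [-4, 0, 7]], 13)

def Spec_rotateCompleteScanner (beacons : List (List Int)) (rotation : Int) (out : List (List Int)) : Prop := out = rotateCompleteScanner_alt beacons rotation
instance (beacons : List (List Int)) (rotation : Int) (out : List (List Int)) : Decidable (Spec_rotateCompleteScanner beacons rotation out) := by unfold Spec_rotateCompleteScanner; infer_instance

-- ===== CLAIM (what is proved, stated in full; the proofs are below) =====
def Claim_equal_rotateCompleteScanner : Prop := ∀ (beacons : List (List Int)) (rotation : Int), Dom_rotateCompleteScanner beacons rotation → Pre_rotateCompleteScanner beacons rotation → Spec_rotateCompleteScanner beacons rotation (rotateCompleteScanner beacons rotation)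

-- ===== LEMMAS AND PROOFS =====

-- Per-index evaluations of A's helpers and of B's pvApply (all definitional).
lemma tod0 (x y z : Int) : rotateToOtherDirection [x, y, z] 0 = [x, y, z] := rfl
lemma tod1 (x y z : Int) : rotateToOtherDirection [x, y, z] 1 = [y, z, x] := rfl
lemma tod2 (x y z : Int) : rotateToOtherDirection [x, y, z] 2 = [z, -y, x] := rfl
lemma tod3 (x y z : Int) : rotateToOtherDirection [x, y, z] 3 = [x, -z, y] := rfl
lemma tod4 (x y z : Int) : rotateToOtherDirection [x, y, z] 4 = [z, x, y] := rfl
lemma tod5 (x y z : Int) : rotateToOtherDirection [x, y, z] 5 = [-x, -z, y] := rfl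
lemma rby0 (x y z : Int) : rotateByY [x, y, z] 0 = [x, y, z] := rfl
lemma rby1 (x y z : Int) : rotateByY [x, y, z] 1 = [-x, y, -z] := rfl
lemma rby2 (x y z : Int) : rotateByY [x, y, z] 2 = [-z, y, x] := rfl
lemma rby3 (x y z : Int) : rotateByY [x, y, z] 3 = [z, y, -x] := rfl
lemma pvApply_eq (a b c d e f g h i x y z : Int) :
    pvApply [[a,b,c],[d,e,f],[g,h,i]] [x,y,z]
      = [a*x+(b*y+(c*z+0)), d*x+(e*y+(f*z+0)), g*x+(h*y+(i*z+0))] := rfl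

-- Per-beacon agreement for each fixed rotation: A's chained dict lookups equal B's composed matrix.
lemma perBeacon (rotation : Int) (h0 : 0 ≤ rotation) (h1 : rotation < 24)
    (b : List Int) (hb : b.length = 3) :
    rotateByY (rotateToOtherDirection b (PySem.Int.floordiv rotation 4)) (PySem.Int.mod rotation 4)
      = pvApply (pvRotationMatrix rotation) b := by
  rcases b with _ | ⟨x, _ | ⟨y, _ | ⟨z, _ | _⟩⟩⟩ <;> simp at hb
  interval_cases rotation
  · rw [show PySem.Int.floordiv (0:Int) 4 = 0 from by decide,
        show PySem.Int.mod (0:Int) 4 = 0 from by decide,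
        tod0 x y z, rby0,
        show pvRotationMatrix 0 = [[1, 0, 0], [0, 1, 0], [0, 0, 1]] from by decide, pvApply_eq]
    simp only [List.cons.injEq, and_true]
    refine ⟨by ring, by ring, by ring⟩
  · rw [show PySem.Int.floordiv (1:Int) 4 = 0 from by decide,
        show PySem.Int.mod (1:Int) 4 = 1 from by decide,
        tod0 x y z, rby1,
        show pvRotationMatrix 1 = [[-1, 0, 0], [0, 1, 0], [0, 0, -1]] from by decide, pvApply_eq]
    simp only [List.cons.injEq, and_true]
    refine ⟨by ring, by ring, by ring⟩
  · rw [show PySem.Int.floordiv (2:Int) 4 = 0 from by decide,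
        show PySem.Int.mod (2:Int) 4 = 2 from by decide,
        tod0 x y z, rby2,
        show pvRotationMatrix 2 = [[0, 0, -1], [0, 1, 0], [1, 0, 0]] from by decide, pvApply_eq]
    simp only [List.cons.injEq, and_true]
    refine ⟨by ring, by ring, by ring⟩
  · rw [show PySem.Int.floordiv (3:Int) 4 = 0 from by decide,
        show PySem.Int.mod (3:Int) 4 = 3 from by decide,
        tod0 x y z, rby3,
        show pvRotationMatrix 3 = [[0, 0, 1], [0, 1, 0], [-1, 0, 0]] from by decide, pvApply_eq]
    simp only [List.cons.injEq, and_true]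
    refine ⟨by ring, by ring, by ring⟩
  · rw [show PySem.Int.floordiv (4:Int) 4 = 1 from by decide,
        show PySem.Int.mod (4:Int) 4 = 0 from by decide,
        tod1 x y z, rby0,
        show pvRotationMatrix 4 = [[0, 1, 0], [0, 0, 1], [1, 0, 0]] from by decide, pvApply_eq]
    simp only [List.cons.injEq, and_true]
    refine ⟨by ring, by ring, by ring⟩
  · rw [show PySem.Int.floordiv (5:Int) 4 = 1 from by decide,
        show PySem.Int.mod (5:Int) 4 = 1 from by decide,
        tod1 x y z, rby1,
        show pvRotationMatrix 5 = [[0, -1, 0], [0, 0, 1], [-1, 0, 0]] from by decide, pvApply_eq]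
    simp only [List.cons.injEq, and_true]
    refine ⟨by ring, by ring, by ring⟩
  · rw [show PySem.Int.floordiv (6:Int) 4 = 1 from by decide,
        show PySem.Int.mod (6:Int) 4 = 2 from by decide,
        tod1 x y z, rby2,
        show pvRotationMatrix 6 = [[-1, 0, 0], [0, 0, 1], [0, 1, 0]] from by decide, pvApply_eq]
    simp only [List.cons.injEq, and_true]
    refine ⟨by ring, by ring, by ring⟩
  · rw [show PySem.Int.floordiv (7:Int) 4 = 1 from by decide,
        show PySem.Int.mod (7:Int) 4 = 3 from by decide,
        tod1 x y z, rby3,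
        show pvRotationMatrix 7 = [[1, 0, 0], [0, 0, 1], [0, -1, 0]] from by decide, pvApply_eq]
    simp only [List.cons.injEq, and_true]
    refine ⟨by ring, by ring, by ring⟩
  · rw [show PySem.Int.floordiv (8:Int) 4 = 2 from by decide,
        show PySem.Int.mod (8:Int) 4 = 0 from by decide,
        tod2 x y z, rby0,
        show pvRotationMatrix 8 = [[0, 0, 1], [0, -1, 0], [1, 0, 0]] from by decide, pvApply_eq]
    simp only [List.cons.injEq, and_true]
    refine ⟨by ring, by ring, by ring⟩
  · rw [show PySem.Int.floordiv (9:Int) 4 = 2 from by decide,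
        show PySem.Int.mod (9:Int) 4 = 1 from by decide,
        tod2 x y z, rby1,
        show pvRotationMatrix 9 = [[0, 0, -1], [0, -1, 0], [-1, 0, 0]] from by decide, pvApply_eq]
    simp only [List.cons.injEq, and_true]
    refine ⟨by ring, by ring, by ring⟩
  · rw [show PySem.Int.floordiv (10:Int) 4 = 2 from by decide,
        show PySem.Int.mod (10:Int) 4 = 2 from by decide,
        tod2 x y z, rby2,
        show pvRotationMatrix 10 = [[-1, 0, 0], [0, -1, 0], [0, 0, 1]] from by decide, pvApply_eq]
    simp only [List.cons.injEq, and_true]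
    refine ⟨by ring, by ring, by ring⟩
  · rw [show PySem.Int.floordiv (11:Int) 4 = 2 from by decide,
        show PySem.Int.mod (11:Int) 4 = 3 from by decide,
        tod2 x y z, rby3,
        show pvRotationMatrix 11 = [[1, 0, 0], [0, -1, 0], [0, 0, -1]] from by decide, pvApply_eq]
    simp only [List.cons.injEq, and_true]
    refine ⟨by ring, by ring, by ring⟩
  · rw [show PySem.Int.floordiv (12:Int) 4 = 3 from by decide,
        show PySem.Int.mod (12:Int) 4 = 0 from by decide,
        tod3 x y z, rby0,
        show pvRotationMatrix 12 = [[1, 0, 0], [0, 0, -1], [0, 1, 0]] from by decide, pvApply_eq]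
    simp only [List.cons.injEq, and_true]
    refine ⟨by ring, by ring, by ring⟩
  · rw [show PySem.Int.floordiv (13:Int) 4 = 3 from by decide,
        show PySem.Int.mod (13:Int) 4 = 1 from by decide,
        tod3 x y z, rby1,
        show pvRotationMatrix 13 = [[-1, 0, 0], [0, 0, -1], [0, -1, 0]] from by decide, pvApply_eq]
    simp only [List.cons.injEq, and_true]
    refine ⟨by ring, by ring, by ring⟩
  · rw [show PySem.Int.floordiv (14:Int) 4 = 3 from by decide,
        show PySem.Int.mod (14:Int) 4 = 2 from by decide,
        tod3 x y z, rby2,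
        show pvRotationMatrix 14 = [[0, -1, 0], [0, 0, -1], [1, 0, 0]] from by decide, pvApply_eq]
    simp only [List.cons.injEq, and_true]
    refine ⟨by ring, by ring, by ring⟩
  · rw [show PySem.Int.floordiv (15:Int) 4 = 3 from by decide,
        show PySem.Int.mod (15:Int) 4 = 3 from by decide,
        tod3 x y z, rby3,
        show pvRotationMatrix 15 = [[0, 1, 0], [0, 0, -1], [-1, 0, 0]] from by decide, pvApply_eq]
    simp only [List.cons.injEq, and_true]
    refine ⟨by ring, by ring, by ring⟩
  · rw [show PySem.Int.floordiv (16:Int) 4 = 4 from by decide,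
        show PySem.Int.mod (16:Int) 4 = 0 from by decide,
        tod4 x y z, rby0,
        show pvRotationMatrix 16 = [[0, 0, 1], [1, 0, 0], [0, 1, 0]] from by decide, pvApply_eq]
    simp only [List.cons.injEq, and_true]
    refine ⟨by ring, by ring, by ring⟩
  · rw [show PySem.Int.floordiv (17:Int) 4 = 4 from by decide,
        show PySem.Int.mod (17:Int) 4 = 1 from by decide,
        tod4 x y z, rby1,
        show pvRotationMatrix 17 = [[0, 0, -1], [1, 0, 0], [0, -1, 0]] from by decide, pvApply_eq]
    simp only [List.cons.injEq, and_true]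
    refine ⟨by ring, by ring, by ring⟩
  · rw [show PySem.Int.floordiv (18:Int) 4 = 4 from by decide,
        show PySem.Int.mod (18:Int) 4 = 2 from by decide,
        tod4 x y z, rby2,
        show pvRotationMatrix 18 = [[0, -1, 0], [1, 0, 0], [0, 0, 1]] from by decide, pvApply_eq]
    simp only [List.cons.injEq, and_true]
    refine ⟨by ring, by ring, by ring⟩
  · rw [show PySem.Int.floordiv (19:Int) 4 = 4 from by decide,
        show PySem.Int.mod (19:Int) 4 = 3 from by decide,
        tod4 x y z, rby3,
        show pvRotationMatrix 19 = [[0, 1, 0], [1, 0, 0], [0, 0, -1]] from by decide, pvApply_eq]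
    simp only [List.cons.injEq, and_true]
    refine ⟨by ring, by ring, by ring⟩
  · rw [show PySem.Int.floordiv (20:Int) 4 = 5 from by decide,
        show PySem.Int.mod (20:Int) 4 = 0 from by decide,
        tod5 x y z, rby0,
        show pvRotationMatrix 20 = [[-1, 0, 0], [0, 0, -1], [0, 1, 0]] from by decide, pvApply_eq]
    simp only [List.cons.injEq, and_true]
    refine ⟨by ring, by ring, by ring⟩
  · rw [show PySem.Int.floordiv (21:Int) 4 = 5 from by decide,
        show PySem.Int.mod (21:Int) 4 = 1 from by decide,
        tod5 x y z, rby1,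
        show pvRotationMatrix 21 = [[1, 0, 0], [0, 0, -1], [0, -1, 0]] from by decide, pvApply_eq]
    simp only [List.cons.injEq, and_true]
    refine ⟨by ring, by ring, by ring⟩
  · rw [show PySem.Int.floordiv (22:Int) 4 = 5 from by decide,
        show PySem.Int.mod (22:Int) 4 = 2 from by decide,
        tod5 x y z, rby2,
        show pvRotationMatrix 22 = [[0, -1, 0], [0, 0, -1], [-1, 0, 0]] from by decide, pvApply_eq]
    simp only [List.cons.injEq, and_true]
    refine ⟨by ring, by ring, by ring⟩
  · rw [show PySem.Int.floordiv (23:Int) 4 = 5 from by decide,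
        show PySem.Int.mod (23:Int) 4 = 3 from by decide,
        tod5 x y z, rby3,
        show pvRotationMatrix 23 = [[0, 1, 0], [0, 0, -1], [1, 0, 0]] from by decide, pvApply_eq]
    simp only [List.cons.injEq, and_true]
    refine ⟨by ring, by ring, by ring⟩

-- ===== VERDICT (by name: the statement is the Claim_ definition above) =====
theorem rotateCompleteScanner_spec : Claim_equal_rotateCompleteScanner := by
  intro beacons rotation _ ⟨h0, h1, hlen⟩
  unfold Spec_rotateCompleteScanner rotateCompleteScanner rotateCompleteScanner_alt
  rw [PySem.List.foldl_append_singleton_eq_map]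
  exact List.map_congr_left fun b hb => perBeacon rotation h0 h1 b (hlen b hb)
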